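-- pv_equiv track=rewrite | github.com/R1-Concepts-Marketing-Dev/Agent-Tracker | scripts/generate_report.py | _parse_connections
-- ===== SOURCE A (Python) =====
-- def _parse_connections(raw: str) -> list[str]:
--     """Return a flat ordered list of node names from the connections string."""
--     if not raw:
--         return []
--     nodes: list[str] = []
--     for part in raw.split("->"):
--         for node in part.split("+"):
--             n = node.strip()
--             if n:
--                 nodes.append(n)
--     return nodes
-- ===== SOURCE B (Python) =====
-- def _parse_connections(raw: str) -> list[str]:
--     """Return a flat ordered list of node names from the connections string."""
--     nodes: list[str] = []
--     cur: list[str] = []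
--     i, n = 0, len(raw)
--     while i < n:
--         c = raw[i]
--         if c == "+" or (c == "-" and i + 1 < n and raw[i + 1] == ">"):
--             t = "".join(cur).strip()
--             if t:
--                 nodes.append(t)
--             cur = []
--             i += 2 if c == "-" else 1
--         else:
--             cur.append(c)
--             i += 1
--     t = "".join(cur).strip()
--     if t:
--         nodes.append(t)
--     return nodes
-- ===== Notes on version B (the rewrite author's own statement) =====
-- stated objective: alternative
-- what changed: Replaces the nested two-level split passes (outer split on the arrow separator, inner split on the plus separator) with a single left-to-right character scan that maintains one pending-token accumulator and emits a stripped token at each delimiter.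
import Mathlib
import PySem

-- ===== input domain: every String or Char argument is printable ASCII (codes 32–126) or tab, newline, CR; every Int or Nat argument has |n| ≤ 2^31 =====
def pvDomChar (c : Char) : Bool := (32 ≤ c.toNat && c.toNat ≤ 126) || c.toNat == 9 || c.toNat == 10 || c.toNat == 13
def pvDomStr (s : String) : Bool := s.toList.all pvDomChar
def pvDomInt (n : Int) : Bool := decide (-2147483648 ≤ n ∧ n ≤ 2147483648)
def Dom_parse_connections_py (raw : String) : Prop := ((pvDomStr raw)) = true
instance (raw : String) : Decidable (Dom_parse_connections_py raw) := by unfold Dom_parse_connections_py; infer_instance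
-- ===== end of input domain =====

-- B replaces A's nested two-level split passes by a single left-to-right scan with one
-- pending-token accumulator, cutting at either delimiter as it is met (objective: alternative).

-- ===== PORT A =====
def parse_connections_py (raw : String) : List String :=
  if raw.toList = [] then []
  else
    (PySem.Chars.splitOn raw.toList ['-', '>']).foldl
      (fun nodes part =>
        (PySem.Chars.splitOn part ['+']).foldl
          (fun nodes node =>
            let n := PySem.Chars.strip node
            if n ≠ [] then nodes ++ [String.ofList n] else nodes)
          nodes)
      []

-- ===== PORT B =====
-- emit step of Source B: t = "".join(cur).strip(); if t: nodes.append(t)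
def pvEmit (cur : List Char) : List String :=
  let t := PySem.Chars.strip cur
  if t = [] then [] else [String.ofList t]

-- the while loop of Source B: cur is the pending token, cut at '+' or at '-' followed by '>'
def pvAltGo : List Char → List Char → List String
  | cur, [] => pvEmit cur
  | cur, c :: rest =>
    if c = '+' then pvEmit cur ++ pvAltGo [] rest
    else if c = '-' ∧ rest.head? = some '>' then pvEmit cur ++ pvAltGo [] rest.tail
    else pvAltGo (cur ++ [c]) rest
  termination_by _ s => s.length
  decreasing_by all_goals (simp [List.length_tail]; try omega)

def parse_connections_py_alt (raw : String) : List String :=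
  pvAltGo [] raw.toList

-- ===== PRECONDITION & SPEC =====
def Spec_parse_connections_py (raw : String) (out : List String) : Prop := out = parse_connections_py_alt raw
instance (raw : String) (out : List String) : Decidable (Spec_parse_connections_py raw out) := by unfold Spec_parse_connections_py; infer_instance

-- ===== CLAIM (what is proved, stated in full; the proofs are below) =====
def Claim_equal_parse_connections_py : Prop := ∀ (raw : String), Dom_parse_connections_py raw → Spec_parse_connections_py raw (parse_connections_py raw)

-- ===== LEMMAS AND PROOFS =====

-- fuel-free form of PySem.Chars.splitOn on the one-char separator "+"
def pvSpP : List Char → List Char → List (List Char)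
  | pre, [] => [pre]
  | pre, c :: rest =>
    if c = '+' then pre :: pvSpP [] rest
    else pvSpP (pre ++ [c]) rest
  termination_by _ s => s.length

-- fuel-free form of PySem.Chars.splitOn on the separator "->"
def pvSpA : List Char → List Char → List (List Char)
  | pre, [] => [pre]
  | pre, c :: rest =>
    if c = '-' ∧ rest.head? = some '>' then pre :: pvSpA [] rest.tail
    else pvSpA (pre ++ [c]) rest
  termination_by _ s => s.length
  decreasing_by all_goals (simp [List.length_tail]; try omega)

-- the combined single-pass token list: cut at '+' and at "->"
def pvTok : List Char → List Char → List (List Char)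
  | cur, [] => [cur]
  | cur, c :: rest =>
    if c = '+' then cur :: pvTok [] rest
    else if c = '-' ∧ rest.head? = some '>' then cur :: pvTok [] rest.tail
    else pvTok (cur ++ [c]) rest
  termination_by _ s => s.length
  decreasing_by all_goals (simp [List.length_tail]; try omega)

-- glue two token lists at the shared boundary token
def pvGlue : List (List Char) → List (List Char) → List (List Char)
  | [], ys => ys
  | [x], [] => [x]
  | [x], y :: yt => (x ++ y) :: yt
  | x :: xs, ys => x :: pvGlue xs ys

theorem pvSpP_ne_nil (pre s : List Char) : pvSpP pre s ≠ [] := by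
  fun_induction pvSpP pre s <;> simp_all

theorem pvTok_ne_nil (cur s : List Char) : pvTok cur s ≠ [] := by
  fun_induction pvTok cur s <;> simp_all

theorem pvGlue_ne_nil (xs ys : List (List Char)) (h : xs ≠ []) : pvGlue xs ys ≠ [] := by
  induction xs with
  | nil => simp at h
  | cons x xs ih => cases xs <;> cases ys <;> simp [pvGlue]

theorem pvGlue_cons_cons (x : List Char) (xs ys : List (List Char)) (h : xs ≠ []) :
    pvGlue (x :: xs) ys = x :: pvGlue xs ys := by
  cases xs with
  | nil => simp at h
  | cons a b => rfl

theorem pvGlue_single_nil (xs : List (List Char)) (h : xs ≠ []) : pvGlue xs [[]] = xs := by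
  induction xs with
  | nil => simp at h
  | cons x xs ih =>
    cases xs with
    | nil => simp [pvGlue]
    | cons y yt => simp [pvGlue, ih]

theorem pvGlue_nil_cons (xs ys : List (List Char)) (h : xs ≠ []) :
    pvGlue xs ([] :: ys) = xs ++ ys := by
  induction xs with
  | nil => simp at h
  | cons x xs ih =>
    cases xs with
    | nil => simp [pvGlue]
    | cons y yt => simp [pvGlue, ih]

theorem pvGlue_assoc (xs ys zs : List (List Char)) :
    pvGlue (pvGlue xs ys) zs = pvGlue xs (pvGlue ys zs) := by
  induction xs with
  | nil => simp [pvGlue]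
  | cons x xs ih =>
    cases xs with
    | nil =>
      cases ys with
      | nil => cases zs <;> simp [pvGlue]
      | cons y yt =>
        cases yt with
        | nil => cases zs <;> simp [pvGlue, List.append_assoc]
        | cons z zt => simp [pvGlue]
    | cons x' xt =>
      rw [pvGlue_cons_cons x (x'::xt) ys (by simp),
          pvGlue_cons_cons x (x'::xt) (pvGlue ys zs) (by simp),
          pvGlue_cons_cons x (pvGlue (x'::xt) ys) zs (pvGlue_ne_nil _ _ (by simp)), ih]

theorem pvGo_plus (fuel : Nat) : ∀ (l : List Char), l.length < fuel → ∀ (cur : List Char) (acc : List (List Char)),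
    PySem.Chars.splitOn.go ['+'] fuel l cur acc = acc.reverse ++ pvSpP cur.reverse l := by
  induction fuel with
  | zero => intro l h; omega
  | succ fuel ih =>
    intro l h cur acc
    cases l with
    | nil => simp [PySem.Chars.splitOn.go, pvSpP]
    | cons c rest =>
      rw [PySem.Chars.splitOn.go]
      by_cases hc : c = '+'
      · subst hc
        simp only [List.isPrefixOf, BEq.rfl, Bool.true_and, if_pos]
        rw [ih _ (by simp at h ⊢; omega)]
        simp [pvSpP]
      · simp only [List.isPrefixOf, Bool.and_true, beq_iff_eq, Ne.symm hc, if_neg,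
          not_false_eq_true]
        rw [ih _ (by simp at h ⊢; omega)]
        simp [pvSpP, hc]

theorem pvGo_arrow (fuel : Nat) : ∀ (l : List Char), l.length < fuel → ∀ (cur : List Char) (acc : List (List Char)),
    PySem.Chars.splitOn.go ['-', '>'] fuel l cur acc = acc.reverse ++ pvSpA cur.reverse l := by
  induction fuel with
  | zero => intro l h; omega
  | succ fuel ih =>
    intro l h cur acc
    cases l with
    | nil => simp [PySem.Chars.splitOn.go, pvSpA]
    | cons c rest =>
      rw [PySem.Chars.splitOn.go]
      by_cases hc : c = '-' ∧ rest.head? = some '>'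
      · obtain ⟨hc1, hc2⟩ := hc
        subst hc1
        obtain ⟨rest', hr⟩ : ∃ rest', rest = '>' :: rest' := by
          cases rest with
          | nil => simp at hc2
          | cons a b => simp at hc2; exact ⟨b, by rw [hc2]⟩
        subst hr
        simp only [List.isPrefixOf, BEq.rfl, Bool.true_and, if_pos]
        rw [ih _ (by simp at h ⊢; omega)]
        simp [pvSpA]
      · have hpre : List.isPrefixOf ['-', '>'] (c :: rest) = false := by
          cases rest with
          | nil => simp [List.isPrefixOf]
          | cons a b =>
            simp [List.isPrefixOf]
            intro h1 h2
            exact absurd ⟨h1.symm, by simp [h2.symm]⟩ hc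
        rw [if_neg (by simp [hpre])]
        rw [ih _ (by simp at h ⊢; omega)]
        rw [pvSpA]
        simp [hc]

theorem pvSplitOn_plus (s : List Char) : PySem.Chars.splitOn s ['+'] = pvSpP [] s := by
  unfold PySem.Chars.splitOn
  rw [pvGo_plus (s.length + 1) s (by omega) [] []]
  simp

theorem pvSplitOn_arrow (s : List Char) : PySem.Chars.splitOn s ['-', '>'] = pvSpA [] s := by
  unfold PySem.Chars.splitOn
  rw [pvGo_arrow (s.length + 1) s (by omega) [] []]
  simp

theorem pvGlue_nil_single_left (ys : List (List Char)) (h : ys ≠ []) : pvGlue [[]] ys = ys := by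
  cases ys with
  | nil => simp at h
  | cons y yt => simp [pvGlue]

theorem pvSpP_glue (a : List Char) : ∀ (pre : List Char),
    pvSpP pre a = pvGlue [pre] (pvSpP [] a) := by
  induction a with
  | nil => intro pre; simp [pvSpP, pvGlue]
  | cons c rest ih =>
    intro pre
    by_cases hc : c = '+'
    · subst hc
      rw [pvSpP, pvSpP, if_pos rfl, if_pos rfl]
      simp [pvGlue]
    · rw [pvSpP, pvSpP, if_neg hc, if_neg hc]
      simp only [List.nil_append]
      rw [ih (pre ++ [c]), ih [c], ← pvGlue_assoc]
      simp [pvGlue]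

theorem pvSpP_append (a : List Char) : ∀ (pre b : List Char),
    pvSpP pre (a ++ b) = pvGlue (pvSpP pre a) (pvSpP [] b) := by
  induction a with
  | nil => intro pre b; simp [pvSpP]; exact pvSpP_glue b pre
  | cons c rest ih =>
    intro pre b
    by_cases hc : c = '+'
    · subst hc
      rw [List.cons_append, pvSpP, pvSpP, if_pos rfl, if_pos rfl, ih [] b,
        pvGlue_cons_cons _ _ _ (pvSpP_ne_nil _ _)]
    · rw [List.cons_append, pvSpP, pvSpP, if_neg hc, if_neg hc, ih (pre ++ [c]) b]

theorem pvTok_glue (n : Nat) : ∀ (s : List Char), s.length ≤ n → ∀ cur,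
    pvTok cur s = pvGlue [cur] (pvTok [] s) := by
  induction n with
  | zero =>
    intro s hs cur
    have : s = [] := by cases s <;> simp_all
    subst this
    simp [pvTok, pvGlue]
  | succ n ih =>
    intro s hs cur
    cases s with
    | nil => simp [pvTok, pvGlue]
    | cons c rest =>
      by_cases hc : c = '+'
      · subst hc
        rw [pvTok, pvTok, if_pos rfl, if_pos rfl]
        simp [pvGlue]
      · by_cases ha : c = '-' ∧ rest.head? = some '>'
        · rw [pvTok, pvTok, if_neg hc, if_neg hc, if_pos ha, if_pos ha]
          simp [pvGlue]
        · rw [pvTok, pvTok, if_neg hc, if_neg hc, if_neg ha, if_neg ha]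
          simp only [List.nil_append]
          rw [ih rest (by simp at hs; omega) (cur ++ [c]), ih rest (by simp at hs; omega) [c],
            ← pvGlue_assoc]
          simp [pvGlue]

theorem pvSnocInfix (a : List Char) (c : Char) (h : ['-', '>'] <:+: (a ++ [c])) :
    ['-', '>'] <:+: a ∨ (c = '>' ∧ a.getLast? = some '-') := by
  obtain ⟨s, t, heq⟩ := h
  rcases List.eq_nil_or_concat t with ht | ⟨t', x, ht⟩
  · subst ht
    right
    have h1 := congrArg List.dropLast heq
    have h2 := congrArg List.getLast? heq
    simp at h1 h2
    refine ⟨h2.symm, ?_⟩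
    rw [← h1]
    simp
  · subst ht
    left
    have h1 := congrArg List.dropLast heq
    simp at h1
    exact ⟨s, t', by
      rw [← h1, show ('>' :: (t' ++ [x])).dropLast = '>' :: t' from by
        rw [← List.cons_append, List.dropLast_concat]]
      simp⟩

theorem pvMain (n : Nat) : ∀ (s : List Char), s.length ≤ n → ∀ (a : List Char),
    ¬ ['-', '>'] <:+: a → ¬ (a.getLast? = some '-' ∧ s.head? = some '>') →
    (pvSpA a s).flatMap (fun p => pvSpP [] p) = pvGlue (pvSpP [] a) (pvTok [] s) := by
  induction n with
  | zero =>
    intro s hs a _ _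
    have : s = [] := by cases s <;> simp_all
    subst this
    rw [pvSpA, pvTok]
    simp [pvGlue_single_nil _ (pvSpP_ne_nil _ _)]
  | succ n ih =>
    intro s hs a hinf hbd
    cases s with
    | nil =>
      rw [pvSpA, pvTok]
      simp [pvGlue_single_nil _ (pvSpP_ne_nil _ _)]
    | cons c rest =>
      by_cases hc : c = '+'
      · subst hc
        have ha : ¬ ('+' = '-' ∧ rest.head? = some '>') := by simp
        rw [pvSpA, if_neg ha, pvTok, if_pos rfl]
        rw [ih rest (by simp at hs; omega) (a ++ ['+'])
          (fun h => by
            rcases pvSnocInfix a '+' h with h | ⟨h, _⟩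
            · exact hinf h
            · simp at h)
          (by simp)]
        rw [pvSpP_append a [] ['+']]
        have : pvSpP [] ['+'] = [[], []] := by
          rw [pvSpP, if_pos rfl, pvSpP]
        rw [this, pvGlue_assoc, pvGlue_cons_cons _ _ _ (by simp),
          pvGlue_nil_single_left _ (pvTok_ne_nil _ _)]
      · by_cases ha : c = '-' ∧ rest.head? = some '>'
        · obtain ⟨hc1, hc2⟩ := ha
          subst hc1
          obtain ⟨rest', hr⟩ : ∃ rest', rest = '>' :: rest' := by
            cases rest with
            | nil => simp at hc2
            | cons x b => simp at hc2; exact ⟨b, by rw [hc2]⟩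
          subst hr
          rw [pvSpA, if_pos (by simp), pvTok, if_neg hc, if_pos (by simp)]
          simp only [List.flatMap_cons, List.tail_cons]
          rw [ih rest' (by simp at hs; omega) [] (by simp) (by simp)]
          rw [show pvSpP ([] : List Char) [] = [[]] from by rw [pvSpP],
            pvGlue_nil_single_left _ (pvTok_ne_nil _ _),
            pvGlue_nil_cons _ _ (pvSpP_ne_nil _ _)]
        · rw [pvSpA, if_neg ha, pvTok, if_neg hc, if_neg ha]
          rw [ih rest (by simp at hs; omega) (a ++ [c])
            (fun h => by
              rcases pvSnocInfix a c h with h | ⟨h1, h2⟩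
              · exact hinf h
              · exact hbd ⟨h2, by simp [h1]⟩)
            (by simpa using ha)]
          rw [pvSpP_append a [] [c],
            show pvSpP ([] : List Char) [c] = [[c]] from by rw [pvSpP, if_neg hc, pvSpP]; simp,
            pvGlue_assoc, ← pvTok_glue rest.length rest (le_refl _) [c]]
          simp

theorem pvAltGo_emit (n : Nat) : ∀ (s : List Char), s.length ≤ n → ∀ cur,
    pvAltGo cur s = (pvTok cur s).flatMap pvEmit := by
  induction n with
  | zero =>
    intro s hs cur
    have : s = [] := by cases s <;> simp_all
    subst this
    simp [pvAltGo, pvTok]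
  | succ n ih =>
    intro s hs cur
    cases s with
    | nil => simp [pvAltGo, pvTok]
    | cons c rest =>
      by_cases hc : c = '+'
      · subst hc
        rw [pvAltGo, if_pos rfl, pvTok, if_pos rfl, ih rest (by simp at hs; omega) []]
        simp
      · by_cases ha : c = '-' ∧ rest.head? = some '>'
        · rw [pvAltGo, if_neg hc, if_pos ha, pvTok, if_neg hc, if_pos ha,
            ih rest.tail (by simp [List.length_tail] at hs ⊢; omega) []]
          simp
        · rw [pvAltGo, if_neg hc, if_neg ha, pvTok, if_neg hc, if_neg ha,
            ih rest (by simp at hs; omega) (cur ++ [c])]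

theorem pvInner (l : List (List Char)) : ∀ (acc : List String),
    l.foldl (fun nodes node =>
      let n := PySem.Chars.strip node
      if n ≠ [] then nodes ++ [String.ofList n] else nodes) acc = acc ++ l.flatMap pvEmit := by
  induction l with
  | nil => intro acc; simp
  | cons x xs ih =>
    intro acc
    simp only [List.foldl_cons, List.flatMap_cons]
    rw [ih]
    by_cases hx : PySem.Chars.strip x = []
    · simp [pvEmit, hx]
    · simp [pvEmit, hx]

-- ===== VERDICT (by name: the statement is the Claim_ definition above) =====
theorem parse_connections_py_spec : Claim_equal_parse_connections_py := by
  intro raw _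
  unfold Spec_parse_connections_py parse_connections_py parse_connections_py_alt
  have key : ∀ s : List Char,
      (PySem.Chars.splitOn s ['-', '>']).foldl
        (fun nodes part =>
          (PySem.Chars.splitOn part ['+']).foldl
            (fun nodes node =>
              let n := PySem.Chars.strip node
              if n ≠ [] then nodes ++ [String.ofList n] else nodes)
            nodes)
        [] = pvAltGo [] s := by
    intro s
    have hfun : (fun (nodes : List String) (part : List Char) =>
        (PySem.Chars.splitOn part ['+']).foldl
          (fun nodes node =>
            let n := PySem.Chars.strip node
            if n ≠ [] then nodes ++ [String.ofList n] else nodes)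
          nodes) = fun nodes part => nodes ++ (pvSpP [] part).flatMap pvEmit := by
      funext nodes part
      rw [pvInner, pvSplitOn_plus]
    rw [hfun, pvSplitOn_arrow, PySem.List.foldl_append_eq_flatMap, List.nil_append,
      ← List.flatMap_assoc,
      pvMain s.length s (le_refl _) [] (by simp) (by simp),
      show pvSpP ([] : List Char) [] = [[]] from by rw [pvSpP],
      pvGlue_nil_single_left _ (pvTok_ne_nil _ _),
      ← pvAltGo_emit s.length s (le_refl _) []]
  by_cases hs : raw.toList = []
  · rw [if_pos hs, hs]
    simp [pvAltGo, pvEmit, PySem.Chars.strip, PySem.Chars.lstrip, PySem.Chars.rstrip]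
  · rw [if_neg hs, key]
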